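-- pv_equiv track=rewrite | github.com/sanjana1qvf/triliontest | server/intelligent_clip_analyzer.py | next_segment_continues_sentence
-- ===== SOURCE A (Python) =====
-- def next_segment_continues_sentence(segments, current_index):
--     """Check if next segment continues sentence"""
--     if current_index + 1 >= len(segments):
--         return False
--
--     next_segment = segments[current_index + 1]["text"].strip()
--
--     if not next_segment:
--         return False
--
--     if next_segment[0].islower():
--         return True
--
--     continuation_starters = [
--         "and", "but", "or", "so", "then", "because", "since", "while",
--         "however", "although", "though", "yet", "still", "also", "too"
--     ]
--
--     next_lower = next_segment.lower()
--     for starter in continuation_starters: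
--         if next_lower.startswith(starter + " "):
--             return True
--
--     return False
-- ===== SOURCE B (Python) =====
-- _STARTERS = (
--     "and", "but", "or", "so", "then", "because", "since", "while",
--     "however", "although", "though", "yet", "still", "also", "too"
-- )
-- # All proper-and-full prefixes of the starters: the states of an incremental
-- # trie-style scan over the text's characters.
-- _PREFIXES = {w[:i] for w in _STARTERS for i in range(len(w) + 1)}
--
--
-- def next_segment_continues_sentence(segments, current_index):
--     """Check if next segment continues sentence"""
--     if current_index + 1 >= len(segments):
--         return False
--
--     text = segments[current_index + 1]["text"].strip()
--
--     if not text: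
--         return False
--
--     if text[0].islower():
--         return True
--
--     # Trie-style character scan: grow the current word one character at a
--     # time, abort as soon as it is no prefix of any starter, and decide at
--     # the first space whether the accumulated word is a complete starter.
--     state = ""
--     for ch in text.lower():
--         if ch == ' ':
--             return state in _STARTERS
--         state += ch
--         if state not in _PREFIXES:
--             return False
--     return False
-- ===== Notes on version B (the rewrite author's own statement) =====
-- stated objective: alternative
-- what changed: A's per-starter loop of startswith(starter + ' ') tests is replaced by a single trie-style character scan that grows the first word one character at a time, aborts as soon as it is no prefix of any starter, and decides membership at the first space.
import Mathlib
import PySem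

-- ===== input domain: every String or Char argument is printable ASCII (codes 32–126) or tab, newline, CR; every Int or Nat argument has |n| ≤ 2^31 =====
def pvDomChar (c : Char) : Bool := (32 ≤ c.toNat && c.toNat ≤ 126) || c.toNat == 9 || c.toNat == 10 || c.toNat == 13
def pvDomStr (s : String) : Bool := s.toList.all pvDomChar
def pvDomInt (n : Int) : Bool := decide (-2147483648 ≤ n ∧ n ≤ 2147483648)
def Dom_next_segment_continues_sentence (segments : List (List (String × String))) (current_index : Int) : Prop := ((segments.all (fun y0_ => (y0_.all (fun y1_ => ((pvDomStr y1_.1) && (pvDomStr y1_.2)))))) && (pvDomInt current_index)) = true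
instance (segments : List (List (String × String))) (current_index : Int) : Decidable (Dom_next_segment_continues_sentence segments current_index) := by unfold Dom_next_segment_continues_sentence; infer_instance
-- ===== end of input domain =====

-- B replaces A's 15-iteration startswith loop by a single trie-style character scan of the first
-- word (grow the word, abort when it is no prefix of any starter, decide at the first space).

-- ===== PORT A =====
def pvStartersA : List String :=
  ["and", "but", "or", "so", "then", "because", "since", "while",
   "however", "although", "though", "yet", "still", "also", "too"]

def next_segment_continues_sentence (segments : List (List (String × String))) (current_index : Int) : Bool :=
  if (segments.length : Int) ≤ current_index + 1 then false
  else
    match PySem.List.pyGet? segments (current_index + 1) with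
    | none => false      -- IndexError: excluded by Pre_
    | some seg =>
      match (PySem.Dict.mk seg).get? "text" with
      | none => false    -- KeyError: excluded by Pre_
      | some t =>
        match PySem.Chars.strip t.toList with
        | [] => false
        | c :: rest =>
          if PySem.Chars.islower c then true
          else
            let nl := PySem.Chars.lower (c :: rest)
            pvStartersA.any (fun st => PySem.Chars.startswith nl (st.toList ++ [' ']))

-- ===== PORT B =====
def pvStartersB : List (List Char) :=
  [['a', 'n', 'd'],
   ['b', 'u', 't'],
   ['o', 'r'],
   ['s', 'o'],
   ['t', 'h', 'e', 'n'],
   ['b', 'e', 'c', 'a', 'u', 's', 'e'],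
   ['s', 'i', 'n', 'c', 'e'],
   ['w', 'h', 'i', 'l', 'e'],
   ['h', 'o', 'w', 'e', 'v', 'e', 'r'],
   ['a', 'l', 't', 'h', 'o', 'u', 'g', 'h'],
   ['t', 'h', 'o', 'u', 'g', 'h'],
   ['y', 'e', 't'],
   ['s', 't', 'i', 'l', 'l'],
   ['a', 'l', 's', 'o'],
   ['t', 'o', 'o']]

-- _PREFIXES = {w[:i] for w in _STARTERS for i in range(len(w)+1)} (a Python set)
def pvPrefixesB : PySem.Set (List Char) :=
  PySem.Set.ofList (pvStartersB.flatMap (fun w => (List.range (w.length + 1)).map w.take))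

-- the 'for ch in text.lower():' loop of Source B, with its accumulated 'state'
def pvScanB : List Char → List Char → Bool
  | [], _ => false
  | ch :: rest, state =>
    if ch = ' ' then pvStartersB.contains state
    else
      let st := state ++ [ch]
      if pvPrefixesB.contains st then pvScanB rest st else false

def next_segment_continues_sentence_alt (segments : List (List (String × String))) (current_index : Int) : Bool :=
  if (segments.length : Int) ≤ current_index + 1 then false
  else
    match PySem.List.pyGet? segments (current_index + 1) with
    | none => false      -- IndexError: excluded by Pre_
    | some seg =>
      match (PySem.Dict.mk seg).get? "text" with
      | none => false    -- KeyError: excluded by Pre_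
      | some t =>
        match PySem.Chars.strip t.toList with
        | [] => false
        | c :: rest =>
          if PySem.Chars.islower c then true
          else
            pvScanB (PySem.Chars.lower (c :: rest)) []

-- ===== PRECONDITION & SPEC =====
-- Pre_ excludes exactly the inputs on which A raises: IndexError when current_index+1 < -len(segments)
-- (while current_index+1 < len), and KeyError when the accessed segment dict has no "text" key. B raises there too.
def Pre_next_segment_continues_sentence (segments : List (List (String × String))) (current_index : Int) : Prop :=
  (segments.length : Int) ≤ current_index + 1 ∨
    (match PySem.List.pyGet? segments (current_index + 1) with
     | some seg => (PySem.Dict.mk seg).contains "text"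
     | none => false) = true
instance (segments : List (List (String × String))) (current_index : Int) : Decidable (Pre_next_segment_continues_sentence segments current_index) := by unfold Pre_next_segment_continues_sentence; infer_instance

def pvWitness_next_segment_continues_sentence : (List (List (String × String))) × Int := ([[("text", "and then some")]], -1)

def Spec_next_segment_continues_sentence (segments : List (List (String × String))) (current_index : Int) (out : Bool) : Prop := out = next_segment_continues_sentence_alt segments current_index
instance (segments : List (List (String × String))) (current_index : Int) (out : Bool) : Decidable (Spec_next_segment_continues_sentence segments current_index out) := by unfold Spec_next_segment_continues_sentence; infer_instance

-- ===== CLAIM (what is proved, stated in full; the proofs are below) =====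
def Claim_equal_next_segment_continues_sentence : Prop := ∀ (segments : List (List (String × String))) (current_index : Int), Dom_next_segment_continues_sentence segments current_index → Pre_next_segment_continues_sentence segments current_index → Spec_next_segment_continues_sentence segments current_index (next_segment_continues_sentence segments current_index)

-- ===== LEMMAS AND PROOFS =====

-- head of dropWhile fails the predicate
lemma pv_dropWhile_head_false (p : Char → Bool) : ∀ (l : List Char) (x : Char) (xs : List Char), l.dropWhile p = x :: xs → p x = false := by
  intro l
  induction l with
  | nil => intro x xs h; simp at h
  | cons a t ih =>
    intro x xs h
    by_cases hp : p a
    · rw [List.dropWhile_cons_of_pos hp] at h; exact ih x xs h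
    · rw [List.dropWhile_cons_of_neg hp] at h
      cases h; simpa using hp

-- A single startswith(starter + " ") test equals "first word is the starter, and a space occurs",
-- provided the starter itself contains no space.
lemma startswith_starter_space_iff (s nl : List Char) (hall : s.all (fun ch => ch != ' ') = true) :
    PySem.Chars.startswith nl (s ++ [' ']) = true ↔
      (nl.takeWhile (fun ch => ch != ' ') = s ∧ ' ' ∈ nl) := by
  have hs : ∀ c ∈ s, c ≠ ' ' := by simpa using hall
  have hts : List.takeWhile (fun ch => ch != ' ') s = s :=
    List.takeWhile_eq_self_iff.mpr (by simpa using hall)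
  rw [PySem.Chars.startswith_iff]
  constructor
  · rintro ⟨rest, hrest⟩
    subst hrest
    refine ⟨?_, by simp⟩
    rw [List.append_assoc, List.takeWhile_append]
    simp [hts]
  · rintro ⟨htw, hmem⟩
    have hsplit : nl = s ++ nl.dropWhile (fun ch => ch != ' ') := by
      conv_lhs => rw [← List.takeWhile_append_dropWhile (p := fun ch => ch != ' ') (l := nl), htw]
    have hdne : nl.dropWhile (fun ch => ch != ' ') ≠ [] := by
      intro h
      rw [h, List.append_nil] at hsplit
      exact hs ' ' (hsplit ▸ hmem) rfl
    obtain ⟨x, xs, hx⟩ := List.exists_cons_of_ne_nil hdne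
    have hxsp : x = ' ' := by
      have := pv_dropWhile_head_false (fun ch => ch != ' ') nl x xs hx
      simpa using this
    exact ⟨xs, by rw [hsplit, hx, hxsp]; simp⟩

-- A's loop over the 15 starters equals "a space occurs and the first word is a starter".
lemma loopA_eq_firstword (nl : List Char) :
    pvStartersA.any (fun st => PySem.Chars.startswith nl (st.toList ++ [' '])) =
      ((nl.contains ' ') && pvStartersB.contains (nl.takeWhile (fun ch => ch != ' '))) := by
  rw [Bool.eq_iff_iff]
  simp only [List.any_eq_true, Bool.and_eq_true]
  constructor
  · rintro ⟨st, hst, h⟩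
    fin_cases hst <;>
      (obtain ⟨h1, h2⟩ := (startswith_starter_space_iff _ nl rfl).mp h
       rw [h1]
       exact ⟨by simpa using h2, rfl⟩)
  · rintro ⟨hsp, hset⟩
    have hmem : ' ' ∈ nl := by simpa using hsp
    have hd := by simpa [pvStartersB] using hset
    rcases hd with h|h|h|h|h|h|h|h|h|h|h|h|h|h|h <;>
      [ exact ⟨"and", by simp [pvStartersA], (startswith_starter_space_iff "and".toList nl rfl).mpr ⟨h, hmem⟩⟩;
        exact ⟨"but", by simp [pvStartersA], (startswith_starter_space_iff "but".toList nl rfl).mpr ⟨h, hmem⟩⟩;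
        exact ⟨"or", by simp [pvStartersA], (startswith_starter_space_iff "or".toList nl rfl).mpr ⟨h, hmem⟩⟩;
        exact ⟨"so", by simp [pvStartersA], (startswith_starter_space_iff "so".toList nl rfl).mpr ⟨h, hmem⟩⟩;
        exact ⟨"then", by simp [pvStartersA], (startswith_starter_space_iff "then".toList nl rfl).mpr ⟨h, hmem⟩⟩;
        exact ⟨"because", by simp [pvStartersA], (startswith_starter_space_iff "because".toList nl rfl).mpr ⟨h, hmem⟩⟩;
        exact ⟨"since", by simp [pvStartersA], (startswith_starter_space_iff "since".toList nl rfl).mpr ⟨h, hmem⟩⟩;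
        exact ⟨"while", by simp [pvStartersA], (startswith_starter_space_iff "while".toList nl rfl).mpr ⟨h, hmem⟩⟩;
        exact ⟨"however", by simp [pvStartersA], (startswith_starter_space_iff "however".toList nl rfl).mpr ⟨h, hmem⟩⟩;
        exact ⟨"although", by simp [pvStartersA], (startswith_starter_space_iff "although".toList nl rfl).mpr ⟨h, hmem⟩⟩;
        exact ⟨"though", by simp [pvStartersA], (startswith_starter_space_iff "though".toList nl rfl).mpr ⟨h, hmem⟩⟩;
        exact ⟨"yet", by simp [pvStartersA], (startswith_starter_space_iff "yet".toList nl rfl).mpr ⟨h, hmem⟩⟩;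
        exact ⟨"still", by simp [pvStartersA], (startswith_starter_space_iff "still".toList nl rfl).mpr ⟨h, hmem⟩⟩;
        exact ⟨"also", by simp [pvStartersA], (startswith_starter_space_iff "also".toList nl rfl).mpr ⟨h, hmem⟩⟩;
        exact ⟨"too", by simp [pvStartersA], (startswith_starter_space_iff "too".toList nl rfl).mpr ⟨h, hmem⟩⟩ ]

-- Any prefix of a starter is in the prefix set (closure property justifying the early abort).
lemma mem_prefixes_of_starter_extends (st ext : List Char)
    (h : (st ++ ext) ∈ pvStartersB) : pvPrefixesB.contains st = true := by
  have hlen : st.length ≤ (st ++ ext).length := by simp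
  have htake : (st ++ ext).take st.length = st := by
    rw [List.take_append]
    simp
  unfold PySem.Set.contains
  rw [List.contains_eq_mem, decide_eq_true_eq]
  simp only [pvPrefixesB, PySem.Set.mem_ofList, List.mem_flatMap, List.mem_map, List.mem_range]
  exact ⟨st ++ ext, h, st.length, by omega, htake⟩

-- The trie-style scan, from any state, equals "a space occurs and state ++ first-word is a starter".
lemma pvScanB_eq (l : List Char) : ∀ (s : List Char),
    pvScanB l s = ((l.contains ' ') && pvStartersB.contains (s ++ l.takeWhile (fun ch => ch != ' '))) := by
  induction l with
  | nil => intro s; simp [pvScanB]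
  | cons ch rest ih =>
    intro s
    by_cases hsp : ch = ' '
    · subst hsp
      simp [pvScanB]
    · have htw : List.takeWhile (fun ch => ch != ' ') (ch :: rest) =
          ch :: rest.takeWhile (fun ch => ch != ' ') := by
        simp [hsp]
      rw [pvScanB]
      simp only [if_neg hsp]
      by_cases hpre : pvPrefixesB.contains (s ++ [ch]) = true
      · rw [if_pos hpre, ih, htw]
        simp [List.append_assoc, Ne.symm hsp]
      · rw [if_neg hpre]
        have hns : pvStartersB.contains (s ++ (ch :: rest.takeWhile (fun ch => ch != ' '))) = false := by
          by_contra hc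
          rw [Bool.not_eq_false, List.contains_eq_mem, decide_eq_true_eq] at hc
          exact hpre (mem_prefixes_of_starter_extends (s ++ [ch]) _
            (by simpa [List.append_assoc] using hc))
        rw [htw, hns]
        simp

-- ===== VERDICT (by name: the statement is the Claim_ definition above) =====
theorem next_segment_continues_sentence_spec : Claim_equal_next_segment_continues_sentence := by
  intro segments current_index _ _
  unfold Spec_next_segment_continues_sentence
  unfold next_segment_continues_sentence next_segment_continues_sentence_alt
  split
  · rfl
  · split
    · rfl
    · split
      · rfl
      · split
        · rfl
        · split
          · rfl
          · rw [loopA_eq_firstword, pvScanB_eq]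
            simp
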